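-- pv_equiv track=rewrite | github.com/jadesoul/reversi | src/make_move.py | gen_make_move_look_n
-- ===== SOURCE A (Python) =====
-- def gen_make_move_look_n(n):
--     define='#define make_move_look_%d(next)' % n
--     ss=[define]
--
--     def level_code(n, l, tab=''):
--         if l==1:
--             tmp='tmp |= pm;'
--             my='if (next(pm) & my) {'
--             ret=tab+'flip |= tmp;'
--             end='}'
--             ss=tmp, my, ret, end
--         elif l==n:
--             tmp='tmp=0;'
--             next='pm=next(pmask);'
--             op='if (pm & op) {'
--             sub=level_code(n, l-1, ' ' * 4)
--             end='}'
--             ss=tmp, next, op, sub, end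
--         else:
--             tmp='tmp |= pm;'
--             next='pm=next(pm);'
--             my='if (pm & my) {'
--             ret=tab+'flip |= tmp;'
--             op='} else if (pm & op) {'
--             sub=level_code(n, l-1, ' ' * 4)
--             end='}'
--             ss=tmp, next, my, ret, op, sub, end
--         ss='\n'.join(ss).split('\n')
--         ss=[tab+s for s in ss]
--         return '\n'.join(ss)
--
--     if n>=2:
--         s=level_code(n, n)
--         ss.extend(s.split('\n'))
--     ss=['%-80s\\' % s for s in ss]
--     return '\n'.join(ss)+'\n'
-- ===== SOURCE B (Python) =====
-- def gen_make_move_look_n(n):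
--     lines = ['#define make_move_look_%d(next)' % n]
--     if n >= 2:
--         sub = ['    tmp |= pm;',
--                '    if (next(pm) & my) {',
--                '        flip |= tmp;',
--                '    }']
--         for _ in range(n - 2):
--             sub = ['    ' + s for s in
--                    ['tmp |= pm;',
--                     'pm=next(pm);',
--                     'if (pm & my) {',
--                     '    flip |= tmp;',
--                     '} else if (pm & op) {']
--                    + sub + ['}']]
--         lines += ['tmp=0;', 'pm=next(pmask);', 'if (pm & op) {'] + sub + ['}']
--     return '\n'.join(s.ljust(80) + '\\' for s in lines) + '\n'
-- ===== Notes on version B (the rewrite author's own statement) =====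
-- stated objective: simpler
-- what changed: Replaced the recursive helper with its per-level join/split/re-prefix string churn by a bottom-up loop over line lists: start from the innermost block and wrap the middle-level template around it n-2 times, indenting four spaces per level.
import Mathlib
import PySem

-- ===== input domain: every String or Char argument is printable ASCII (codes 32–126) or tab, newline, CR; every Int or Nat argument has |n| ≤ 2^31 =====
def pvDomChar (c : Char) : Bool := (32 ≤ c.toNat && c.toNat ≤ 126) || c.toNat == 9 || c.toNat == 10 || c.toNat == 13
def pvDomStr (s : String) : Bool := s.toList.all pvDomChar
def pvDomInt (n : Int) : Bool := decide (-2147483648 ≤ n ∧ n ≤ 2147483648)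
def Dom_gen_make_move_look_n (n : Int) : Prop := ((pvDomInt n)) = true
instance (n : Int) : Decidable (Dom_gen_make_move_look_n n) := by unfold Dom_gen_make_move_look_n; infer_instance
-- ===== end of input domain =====

-- B replaces the recursive join/split/re-prefix helper by a bottom-up loop wrapping
-- the middle-level line block around the innermost block; objective: simpler.


-- ===== PORT A =====
-- '%-80s\' % s : left-justify with spaces to width 80, then a backslash (exact for %-80s on a str argument)
def pvFmtA (s : List Char) : List Char := s ++ List.replicate (80 - s.length) ' ' ++ ['\\']

-- level_code, transliterated on List Char; Python only ever calls it with l ≥ 1 (l runs n, n-1, …, 1), so l is a Nat here (the 0 case is unreachable)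
def levelCodeA (n : Int) : Nat → List Char → List Char
  | 0, _tab => []
  | 1, tab =>
    let tmp := "tmp |= pm;".toList
    let my := "if (next(pm) & my) {".toList
    let ret := tab ++ "flip |= tmp;".toList
    let end_ := "}".toList
    let ss := [tmp, my, ret, end_]
    let ss := PySem.Chars.splitOn (PySem.Chars.join ['\n'] ss) ['\n']
    let ss := ss.map (fun s => tab ++ s)
    PySem.Chars.join ['\n'] ss
  | (k+2), tab =>
    if ((k : Int) + 2) = n then
      let tmp := "tmp=0;".toList
      let next := "pm=next(pmask);".toList
      let op := "if (pm & op) {".toList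
      let sub := levelCodeA n (k+1) (List.replicate 4 ' ')
      let end_ := "}".toList
      let ss := [tmp, next, op, sub, end_]
      let ss := PySem.Chars.splitOn (PySem.Chars.join ['\n'] ss) ['\n']
      let ss := ss.map (fun s => tab ++ s)
      PySem.Chars.join ['\n'] ss
    else
      let tmp := "tmp |= pm;".toList
      let next := "pm=next(pm);".toList
      let my := "if (pm & my) {".toList
      let ret := tab ++ "flip |= tmp;".toList
      let op := "} else if (pm & op) {".toList
      let sub := levelCodeA n (k+1) (List.replicate 4 ' ')
      let end_ := "}".toList
      let ss := [tmp, next, my, ret, op, sub, end_]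
      let ss := PySem.Chars.splitOn (PySem.Chars.join ['\n'] ss) ['\n']
      let ss := ss.map (fun s => tab ++ s)
      PySem.Chars.join ['\n'] ss

def gen_make_move_look_n (n : Int) : String :=
  let define := "#define make_move_look_".toList ++ PySem.Int.toChars n ++ "(next)".toList
  let ss := [define]
  let ss := if n ≥ 2 then ss ++ PySem.Chars.splitOn (levelCodeA n n.toNat []) ['\n'] else ss
  let ss := ss.map pvFmtA
  String.ofList (PySem.Chars.join ['\n'] ss ++ ['\n'])

-- ===== PORT B =====
-- s.ljust(80) + '\'
def pvFmtB (s : List Char) : List Char := (s ++ List.replicate (80 - s.length) ' ') ++ ['\\']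

def pvMidB : List (List Char) :=
  ["tmp |= pm;".toList, "pm=next(pm);".toList, "if (pm & my) {".toList,
   "    flip |= tmp;".toList, "} else if (pm & op) {".toList]

def pvSub0B : List (List Char) :=
  ["    tmp |= pm;".toList, "    if (next(pm) & my) {".toList,
   "        flip |= tmp;".toList, "    }".toList]

def pvWrapB (sub : List (List Char)) : List (List Char) :=
  (pvMidB ++ sub ++ ["}".toList]).map (fun s => "    ".toList ++ s)

def pvLoopB : Nat → List (List Char) → List (List Char)
  | 0, sub => sub
  | k+1, sub => pvLoopB k (pvWrapB sub)

def gen_make_move_look_n_alt (n : Int) : String :=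
  let lines := ["#define make_move_look_".toList ++ PySem.Int.toChars n ++ "(next)".toList]
  let lines := if n ≥ 2 then
      lines ++ (["tmp=0;".toList, "pm=next(pmask);".toList, "if (pm & op) {".toList]
                ++ pvLoopB (n-2).toNat pvSub0B ++ ["}".toList])
    else lines
  String.ofList (PySem.Chars.join ['\n'] (lines.map pvFmtB) ++ ['\n'])

-- ===== PRECONDITION & SPEC =====
-- Pre_ excludes large n, on which Python A's recursive level_code helper exceeds CPython's
-- recursion limit and raises RecursionError; the exact threshold (near 1000) depends on the
-- caller's stack depth, so a margin is kept and Pre_ also excludes some n on which A returns.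
def Pre_gen_make_move_look_n (n : Int) : Prop := n ≤ 900
instance (n : Int) : Decidable (Pre_gen_make_move_look_n n) := by unfold Pre_gen_make_move_look_n; infer_instance
def pvWitness_gen_make_move_look_n : Int := 5

def Spec_gen_make_move_look_n (n : Int) (out : String) : Prop := out = gen_make_move_look_n_alt n
instance (n : Int) (out : String) : Decidable (Spec_gen_make_move_look_n n out) := by unfold Spec_gen_make_move_look_n; infer_instance

-- ===== CLAIM (what is proved, stated in full; the proofs are below) =====
def Claim_equal_gen_make_move_look_n : Prop := ∀ (n : Int), Dom_gen_make_move_look_n n → Pre_gen_make_move_look_n n → Spec_gen_make_move_look_n n (gen_make_move_look_n n)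

-- ===== LEMMAS AND PROOFS =====

-- scanning a newline-free suffix: go just copies it into the current piece
theorem pvGo_nosep (l : List Char) (h : '\n' ∉ l) :
    ∀ (fuel : Nat), l.length ≤ fuel → ∀ (cur : List Char) (acc : List (List Char)),
    PySem.Chars.splitOn.go ['\n'] fuel l cur acc = ((cur.reverse ++ l) :: acc).reverse := by
  induction l with
  | nil => intro fuel _ cur acc; cases fuel <;> simp [PySem.Chars.splitOn.go]
  | cons c rest ih =>
    intro fuel hf cur acc
    cases fuel with
    | zero => simp at hf
    | succ f =>
      have hc : c ≠ '\n' := by simp at h; tauto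
      have hrest : '\n' ∉ rest := by simp at h; tauto
      simp only [PySem.Chars.splitOn.go]
      have : List.isPrefixOf ['\n'] (c :: rest) = false := by
        simp [List.isPrefixOf]; exact fun hh => absurd hh.symm hc
      rw [this]
      simp only [Bool.false_eq_true, if_false]
      rw [ih hrest f (by simpa using Nat.le_of_succ_le_succ hf) (c :: cur) acc]
      simp

-- scanning a newline-free piece up to the next separator
theorem pvGo_scan (s : List Char) (h : '\n' ∉ s) :
    ∀ (fuel : Nat), s.length < fuel → ∀ (rest cur : List Char) (acc : List (List Char)),
    PySem.Chars.splitOn.go ['\n'] fuel (s ++ '\n' :: rest) cur acc =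
      PySem.Chars.splitOn.go ['\n'] (fuel - s.length - 1) rest [] ((cur.reverse ++ s) :: acc) := by
  induction s with
  | nil =>
    intro fuel hf rest cur acc
    cases fuel with
    | zero => simp at hf
    | succ f =>
      simp only [List.nil_append, PySem.Chars.splitOn.go]
      have : List.isPrefixOf ['\n'] ('\n' :: rest) = true := by simp [List.isPrefixOf]
      rw [this]
      simp
  | cons c s' ih =>
    intro fuel hf rest cur acc
    cases fuel with
    | zero => simp at hf
    | succ f =>
      have hc : c ≠ '\n' := by simp at h; tauto
      have hs' : '\n' ∉ s' := by simp at h; tauto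
      simp only [List.cons_append, PySem.Chars.splitOn.go]
      have : List.isPrefixOf ['\n'] (c :: (s' ++ '\n' :: rest)) = false := by
        simp [List.isPrefixOf]; exact fun hh => absurd hh.symm hc
      rw [this]
      simp only [Bool.false_eq_true, if_false]
      rw [ih hs' f (by simpa using Nat.lt_of_succ_lt_succ hf) rest (c :: cur) acc]
      have harith : (f + 1) - (c :: s').length - 1 = f - s'.length - 1 := by
        simp only [List.length_cons]; omega
      rw [harith]
      simp

-- join of two nonempty line lists
theorem pvJoin_append (A B : List (List Char)) (hA : A ≠ []) (hB : B ≠ []) :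
    PySem.Chars.join ['\n'] (A ++ B) =
      PySem.Chars.join ['\n'] A ++ '\n' :: PySem.Chars.join ['\n'] B := by
  induction A with
  | nil => exact absurd rfl hA
  | cons a A' ih =>
    cases A' with
    | nil =>
      cases B with
      | nil => exact absurd rfl hB
      | cons b B' => simp [PySem.Chars.join_cons_cons, PySem.Chars.join_singleton]
    | cons a' A'' =>
      have h2 := PySem.Chars.join_cons_cons ['\n'] a a' (A'' ++ B)
      have h3 := PySem.Chars.join_cons_cons ['\n'] a a' A''
      calc PySem.Chars.join ['\n'] ((a :: a' :: A'') ++ B)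
          = a ++ ['\n'] ++ PySem.Chars.join ['\n'] ((a' :: A'') ++ B) := h2
        _ = a ++ ['\n'] ++ (PySem.Chars.join ['\n'] (a' :: A'') ++ '\n' :: PySem.Chars.join ['\n'] B) := by
              rw [ih (by simp)]
        _ = (a ++ ['\n'] ++ PySem.Chars.join ['\n'] (a' :: A'')) ++ '\n' :: PySem.Chars.join ['\n'] B := by
              simp
        _ = PySem.Chars.join ['\n'] (a :: a' :: A'') ++ '\n' :: PySem.Chars.join ['\n'] B := by rw [h3]

-- splitting a join of nonempty newline-free lines gives the lines back
theorem pvSplit_join (L : List (List Char)) (hne : L ≠ []) (h : ∀ s ∈ L, '\n' ∉ s) :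
    PySem.Chars.splitOn (PySem.Chars.join ['\n'] L) ['\n'] = L := by
  have main : ∀ (L : List (List Char)), L ≠ [] → (∀ s ∈ L, '\n' ∉ s) →
      ∀ (fuel : Nat), (PySem.Chars.join ['\n'] L).length < fuel → ∀ (acc : List (List Char)),
      PySem.Chars.splitOn.go ['\n'] fuel (PySem.Chars.join ['\n'] L) [] acc = acc.reverse ++ L := by
    intro L
    induction L with
    | nil => intro hne; exact absurd rfl hne
    | cons s L' ih =>
      intro _ h fuel hf acc
      cases L' with
      | nil =>
        rw [PySem.Chars.join_singleton] at hf ⊢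
        rw [pvGo_nosep s (h s (by simp)) fuel (Nat.le_of_lt hf) [] acc]
        simp
      | cons t L'' =>
        rw [PySem.Chars.join_cons_cons] at hf ⊢
        have hjoin : s ++ ['\n'] ++ PySem.Chars.join ['\n'] (t :: L'') =
            s ++ '\n' :: PySem.Chars.join ['\n'] (t :: L'') := by simp
        rw [hjoin]
        rw [pvGo_scan s (h s (by simp)) fuel (by simp at hf; omega) _ [] acc]
        simp only [List.reverse_nil, List.nil_append]
        rw [ih (by simp) (fun x hx => h x (by simp [hx]))
            (fuel - s.length - 1) (by simp at hf; omega) (s :: acc)]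
        simp
  rw [PySem.Chars.splitOn]
  exact main L hne h ((PySem.Chars.join ['\n'] L).length + 1) (by omega) []

-- the line list that level_code at level l (≥ 1), tab prefix 'tab', joins into its result
def pvLinesA (n : Int) : Nat → List Char → List (List Char)
  | 0, tab => [tab]
  | 1, tab =>
    ["tmp |= pm;".toList, "if (next(pm) & my) {".toList,
     tab ++ "flip |= tmp;".toList, "}".toList].map (fun s => tab ++ s)
  | (k+2), tab =>
    if ((k : Int) + 2) = n then
      (["tmp=0;".toList, "pm=next(pmask);".toList, "if (pm & op) {".toList]
        ++ pvLinesA n (k+1) (List.replicate 4 ' ') ++ ["}".toList]).map (fun s => tab ++ s)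
    else
      (["tmp |= pm;".toList, "pm=next(pm);".toList, "if (pm & my) {".toList,
        tab ++ "flip |= tmp;".toList, "} else if (pm & op) {".toList]
        ++ pvLinesA n (k+1) (List.replicate 4 ' ') ++ ["}".toList]).map (fun s => tab ++ s)

theorem pvLinesA_ne_nil (n : Int) : ∀ (l : Nat) (tab : List Char), pvLinesA n l tab ≠ [] := by
  intro l tab
  match l with
  | 0 => simp [pvLinesA]
  | 1 => simp [pvLinesA]
  | (k+2) => unfold pvLinesA; split <;> simp

theorem pvLinesA_nosub (n : Int) : ∀ (l : Nat) (tab : List Char), '\n' ∉ tab →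
    ∀ s ∈ pvLinesA n l tab, '\n' ∉ s := by
  intro l
  induction l using Nat.strong_induction_on with
  | _ l ih =>
    intro tab htab s hs
    match l with
    | 0 => simp [pvLinesA] at hs; simp [hs, htab]
    | 1 =>
      simp [pvLinesA] at hs
      rcases hs with h | h | h | h <;> subst h <;> simp [htab]
    | (k+2) =>
      unfold pvLinesA at hs
      have hfour : '\n' ∉ List.replicate 4 ' ' := by decide
      split at hs <;>
      · simp only [List.map_append, List.mem_append, List.mem_map] at hs
        rcases hs with (⟨x, hx, rfl⟩ | ⟨x, hx, rfl⟩) | ⟨x, hx, rfl⟩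
        · simp at hx
          rcases hx with h | h | h | h | h <;> (try subst h) <;> simp [htab]
        · have := ih (k+1) (by omega) (List.replicate 4 ' ') hfour x hx
          simp [htab, this]
        · simp at hx; subst hx; simp [htab]

-- a join-typed element in the middle of a joined list flattens
theorem pvJoin_mid (pre : List (List Char)) (hpre : pre ≠ []) (M : List (List Char)) (hM : M ≠ []) (e : List Char) :
    PySem.Chars.join ['\n'] (pre ++ [PySem.Chars.join ['\n'] M, e]) =
      PySem.Chars.join ['\n'] (pre ++ (M ++ [e])) := by
  rw [pvJoin_append pre _ hpre (by simp), pvJoin_append pre _ hpre (by simp [hM]),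
      pvJoin_append M [e] hM (by simp)]
  simp [PySem.Chars.join_cons_cons, PySem.Chars.join_singleton]

theorem pvLevelCodeA_eq (n : Int) : ∀ (k : Nat) (tab : List Char), '\n' ∉ tab →
    levelCodeA n (k+1) tab = PySem.Chars.join ['\n'] (pvLinesA n (k+1) tab) := by
  intro k
  induction k using Nat.strong_induction_on with
  | _ k ih =>
    intro tab htab
    match k with
    | 0 =>
      show levelCodeA n 1 tab = _
      unfold levelCodeA
      dsimp only
      rw [pvSplit_join _ (by simp) ?_]
      · rfl
      · intro s hs
        simp at hs
        rcases hs with h | h | h | h <;> subst h <;> simp [htab]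
    | (j+1) =>
      have hfour : '\n' ∉ List.replicate 4 ' ' := by decide
      have hsub := ih j (by omega) (List.replicate 4 ' ') hfour
      show levelCodeA n (j+2) tab = _
      unfold levelCodeA pvLinesA
      dsimp only
      have hM := pvLinesA_nosub n (j+1) (List.replicate 4 ' ') hfour
      have hMne := pvLinesA_ne_nil n (j+1) (List.replicate 4 ' ')
      split
      · rw [hsub]
        rw [show ["tmp=0;".toList, "pm=next(pmask);".toList, "if (pm & op) {".toList,
              PySem.Chars.join ['\n'] (pvLinesA n (j+1) (List.replicate 4 ' ')), "}".toList] =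
            ["tmp=0;".toList, "pm=next(pmask);".toList, "if (pm & op) {".toList] ++
              [PySem.Chars.join ['\n'] (pvLinesA n (j+1) (List.replicate 4 ' ')), "}".toList] by simp]
        rw [pvJoin_mid _ (by simp) _ hMne]
        rw [pvSplit_join _ (by simp) ?_]
        · simp
        · intro s hs
          simp only [List.mem_append] at hs
          rcases hs with h | h | h
          · simp at h; rcases h with h | h | h <;> subst h <;> decide
          · exact hM s h
          · simp at h; subst h; decide
      · rw [hsub]
        rw [show ["tmp |= pm;".toList, "pm=next(pm);".toList, "if (pm & my) {".toList,
              tab ++ "flip |= tmp;".toList, "} else if (pm & op) {".toList,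
              PySem.Chars.join ['\n'] (pvLinesA n (j+1) (List.replicate 4 ' ')), "}".toList] =
            ["tmp |= pm;".toList, "pm=next(pm);".toList, "if (pm & my) {".toList,
              tab ++ "flip |= tmp;".toList, "} else if (pm & op) {".toList] ++
              [PySem.Chars.join ['\n'] (pvLinesA n (j+1) (List.replicate 4 ' ')), "}".toList] by simp]
        rw [pvJoin_mid _ (by simp) _ hMne]
        rw [pvSplit_join _ (by simp) ?_]
        · simp
        · intro s hs
          simp only [List.mem_append] at hs
          rcases hs with h | h | h
          · simp at h
            rcases h with h | h | h | h | h <;> (try subst h) <;> simp [htab]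
          · exact hM s h
          · simp at h; subst h; decide

-- pvLoopB applied once more wraps on the outside
theorem pvLoopB_succ' : ∀ (k : Nat) (s : List (List Char)),
    pvLoopB (k+1) s = pvWrapB (pvLoopB k s) := by
  intro k
  induction k with
  | zero => intro s; rfl
  | succ j ih => intro s; rw [show pvLoopB (j+2) s = pvLoopB (j+1) (pvWrapB s) from rfl, ih]; rfl

-- A's inner line lists agree with B's wrap loop
theorem pvLines_eq_loop (n : Int) : ∀ (j : Nat), ((j : Int) + 1) < n →
    pvLinesA n (j+1) (List.replicate 4 ' ') = pvLoopB j pvSub0B := by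
  intro j
  induction j with
  | zero =>
    intro _
    show pvLinesA n 1 (List.replicate 4 ' ') = pvSub0B
    conv_lhs => rw [pvLinesA]
    decide
  | succ i ih =>
    intro hj
    have hne : ¬ (((i : Nat) : Int) + 2 = n) := by push_cast at hj ⊢; omega
    rw [pvLoopB_succ', ← ih (by push_cast at hj ⊢; omega)]
    show pvLinesA n (i+2) (List.replicate 4 ' ') = pvWrapB (pvLinesA n (i+1) (List.replicate 4 ' '))
    conv_lhs => rw [pvLinesA]
    rw [if_neg hne]
    unfold pvWrapB
    have h5 : ["tmp |= pm;".toList, "pm=next(pm);".toList, "if (pm & my) {".toList,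
        List.replicate 4 ' ' ++ "flip |= tmp;".toList, "} else if (pm & op) {".toList] = pvMidB := by
      decide
    rw [h5]
    have hfun : (fun s => List.replicate 4 ' ' ++ s) = (fun s : List Char => "    ".toList ++ s) := by
      funext s; congr 1
    rw [hfun]

-- the two paddings are the same function
theorem pvFmt_eq : pvFmtA = pvFmtB := by
  funext s; simp [pvFmtA, pvFmtB]

-- ===== VERDICT (by name: the statement is the Claim_ definition above) =====
theorem gen_make_move_look_n_spec : Claim_equal_gen_make_move_look_n := by
  intro n _ _
  show gen_make_move_look_n n = gen_make_move_look_n_alt n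
  unfold gen_make_move_look_n gen_make_move_look_n_alt
  rw [pvFmt_eq]
  by_cases h : n ≥ 2
  · simp only [if_pos h]
    obtain ⟨k, hk⟩ : ∃ k : Nat, n.toNat = k + 2 := ⟨n.toNat - 2, by omega⟩
    have hcast : ((k : Int) + 2) = n := by omega
    rw [hk, pvLevelCodeA_eq n (k+1) [] (by simp)]
    rw [pvSplit_join _ (pvLinesA_ne_nil n (k+2) []) (pvLinesA_nosub n (k+2) [] (by simp))]
    show String.ofList (PySem.Chars.join ['\n'] (([_] ++ pvLinesA n (k+2) []).map pvFmtB) ++ ['\n']) = _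
    have hlines : pvLinesA n (k+2) [] =
        ["tmp=0;".toList, "pm=next(pmask);".toList, "if (pm & op) {".toList]
          ++ pvLoopB (n-2).toNat pvSub0B ++ ["}".toList] := by
      unfold pvLinesA
      rw [if_pos hcast]
      have hk2 : (n-2).toNat = k := by omega
      rw [hk2, ← pvLines_eq_loop n k (by omega)]
      simp
    rw [hlines]
  · simp only [if_neg h]
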